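-- pv_equiv track=rewrite | github.com/srikalyan/Nemotron | src/nemo_runspec/utils.py | filter_config_file_args
-- ===== SOURCE A (Python) =====
-- CONFIG_FILE_KEYS = {"--config-file", "--config_file", "--config", "-c"}
--
-- def filter_config_file_args(args: list[str]) -> list[str]:
--     """Remove --config-file and related arguments from args list.
--
--     Handles both formats:
--     - --config-file path
--     - --config-file=path
--     - -c path
--     - -c=path
--
--     Args:
--         args: Command line arguments
--
--     Returns:
--         Filtered arguments without config file flags
--     """
--     filtered: list[str] = []
--     skip_next = False
--
--     for i, arg in enumerate(args):
--         if skip_next: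
--             skip_next = False
--             continue
--
--         # Handle --config-file=path format
--         if "=" in arg:
--             key = arg.split("=", 1)[0]
--             if key in CONFIG_FILE_KEYS:
--                 continue
--         # Handle --config-file path format
--         elif arg in CONFIG_FILE_KEYS:
--             skip_next = True
--             continue
--
--         filtered.append(arg)
--
--     return filtered
-- ===== SOURCE B (Python) =====
-- CONFIG_FILE_KEYS = {"--config-file", "--config_file", "--config", "-c"}
--
--
-- def filter_config_file_args(args: list[str]) -> list[str]:
--     """Remove --config-file and related arguments from args list.
--
--     Two-pass: first build the set of indices to drop, then filter by index.
--     """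
--     drop: set[int] = set()
--     for i, arg in enumerate(args):
--         if i in drop:
--             continue
--         if "=" in arg:
--             if arg.split("=", 1)[0] in CONFIG_FILE_KEYS:
--                 drop.add(i)
--         elif arg in CONFIG_FILE_KEYS:
--             drop.add(i)
--             drop.add(i + 1)
--     return [arg for i, arg in enumerate(args) if i not in drop]
-- ===== Notes on version B (the rewrite author's own statement) =====
-- stated objective: alternative
-- what changed: Replaces A's single pass with a carried skip_next boolean state machine by a two-pass decomposition: first build an explicit set of indices to drop (a flag index plus its value index), then filter the list by index membership.
import Mathlib
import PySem

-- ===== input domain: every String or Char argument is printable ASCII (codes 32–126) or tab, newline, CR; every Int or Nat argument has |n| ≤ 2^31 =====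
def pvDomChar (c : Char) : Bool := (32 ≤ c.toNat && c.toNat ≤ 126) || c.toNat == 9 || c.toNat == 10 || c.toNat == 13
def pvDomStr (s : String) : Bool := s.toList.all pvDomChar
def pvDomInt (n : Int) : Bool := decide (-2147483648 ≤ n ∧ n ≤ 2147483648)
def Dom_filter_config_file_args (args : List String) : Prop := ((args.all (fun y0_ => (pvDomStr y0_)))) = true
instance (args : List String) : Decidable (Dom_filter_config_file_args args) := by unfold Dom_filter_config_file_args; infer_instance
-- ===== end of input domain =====

-- B replaces A's one-pass skip_next state machine by a two-pass decomposition
-- (build an explicit drop-index set, then filter by index); alternative, not faster.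


-- ===== PORT A =====
-- module constant CONFIG_FILE_KEYS (a Python set)
def pvCONFIG_FILE_KEYS : PySem.Set String :=
  PySem.Set.ofList ["--config-file", "--config_file", "--config", "-c"]

-- arg.split("=", 1)[0]; sep "=" ≠ "" so splitMax? is some, and split results are
-- nonempty, so [0] is the head (exact on these inputs)
def pvKeyOf (arg : String) : String :=
  ((PySem.Str.splitMax? arg "=" 1).getD []).headD ""

-- literal port of A: fold over args carrying (skip_next, filtered)
def filter_config_file_args (args : List String) : List String :=
  (args.foldl
    (fun (st : Bool × List String) arg =>
      if st.1 then (false, st.2)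
      else if PySem.Str.isIn "=" arg then
        (if pvCONFIG_FILE_KEYS.contains (pvKeyOf arg) then (false, st.2)
         else (false, st.2 ++ [arg]))
      else if pvCONFIG_FILE_KEYS.contains arg then (true, st.2)
      else (false, st.2 ++ [arg]))
    (false, ([] : List String))).2

-- ===== PORT B =====
-- first pass: one step of building the drop-index set
def pvDropStep (s : PySem.Set Int) (p : Int × String) : PySem.Set Int :=
  if s.contains p.1 then s
  else if PySem.Str.isIn "=" p.2 then
    (if pvCONFIG_FILE_KEYS.contains (pvKeyOf p.2) then s.add p.1 else s)
  else if pvCONFIG_FILE_KEYS.contains p.2 then (s.add p.1).add (p.1 + 1)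
  else s

-- literal port of B: build drop, then filter by index membership
def filter_config_file_args_alt (args : List String) : List String :=
  let drop := (PySem.List.enumerate args).foldl pvDropStep PySem.Set.empty
  ((PySem.List.enumerate args).filter (fun p => !(drop.contains p.1))).map Prod.snd

-- ===== PRECONDITION & SPEC =====
def Spec_filter_config_file_args (args : List String) (out : List String) : Prop := out = filter_config_file_args_alt args
instance (args : List String) (out : List String) : Decidable (Spec_filter_config_file_args args out) := by unfold Spec_filter_config_file_args; infer_instance

-- ===== CLAIM (what is proved, stated in full; the proofs are below) =====
def Claim_equal_filter_config_file_args : Prop := ∀ (args : List String), Dom_filter_config_file_args args → Spec_filter_config_file_args args (filter_config_file_args args)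

-- ===== LEMMAS AND PROOFS =====

-- recursive reading of A's loop, for the proofs
def pvLoopA : List String → Bool → List String
  | [], _ => []
  | a :: l, skip =>
    if skip then pvLoopA l false
    else if PySem.Str.isIn "=" a then
      (if pvCONFIG_FILE_KEYS.contains (pvKeyOf a) then pvLoopA l false
       else a :: pvLoopA l false)
    else if pvCONFIG_FILE_KEYS.contains a then pvLoopA l true
    else a :: pvLoopA l false

lemma pvContains_false {s : PySem.Set Int} {x : Int} : s.contains x = false ↔ x ∉ s := by
  rw [← PySem.Set.contains_iff]
  cases s.contains x <;> simp

lemma pvFoldA (l : List String) (skip : Bool) (acc : List String) :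
    (l.foldl
      (fun (st : Bool × List String) arg =>
        if st.1 then (false, st.2)
        else if PySem.Str.isIn "=" arg then
          (if pvCONFIG_FILE_KEYS.contains (pvKeyOf arg) then (false, st.2)
           else (false, st.2 ++ [arg]))
        else if pvCONFIG_FILE_KEYS.contains arg then (true, st.2)
        else (false, st.2 ++ [arg]))
      (skip, acc)).2 = acc ++ pvLoopA l skip := by
  induction l generalizing skip acc with
  | nil => simp [pvLoopA]
  | cons a l ih =>
    cases skip with
    | true =>
      have h := ih false acc
      simpa [pvLoopA] using h
    | false =>
      by_cases h1 : PySem.Chars.isIn ['='] a.toList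
      · by_cases h2 : pvKeyOf a ∈ pvCONFIG_FILE_KEYS
        · have h := ih false acc
          simpa [pvLoopA, h1, h2] using h
        · have h := ih false (acc ++ [a])
          simpa [pvLoopA, h1, h2] using h
      · by_cases h3 : a ∈ pvCONFIG_FILE_KEYS
        · have h := ih true acc
          simpa [pvLoopA, h1, h3] using h
        · have h := ih false (acc ++ [a])
          simpa [pvLoopA, h1, h3] using h

-- the first pass only adds indices ≥ the current one
lemma pvDrop_lb (l : List String) (n : Int) (s : PySem.Set Int) (m : Int)
    (hm : m ∈ (PySem.List.enumerate l n).foldl pvDropStep s) : m ∈ s ∨ n ≤ m := by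
  induction l generalizing n s with
  | nil =>
    simp only [PySem.List.enumerate, List.foldl_nil] at hm
    exact Or.inl hm
  | cons a l ih =>
    simp only [PySem.List.enumerate, List.foldl_cons] at hm
    rcases ih _ _ hm with h | h
    · unfold pvDropStep at h
      split_ifs at h with h1 h2 h3 h4
      · exact Or.inl h
      · rw [PySem.Set.mem_add] at h
        rcases h with h | h
        · exact Or.inl h
        · right; omega
      · exact Or.inl h
      · rw [PySem.Set.mem_add, PySem.Set.mem_add] at h
        rcases h with (h | h) | h
        · exact Or.inl h
        · right; omega
        · right; omega
      · exact Or.inl h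
    · right; omega

-- the first pass never removes an index
lemma pvDrop_mono (l : List String) (n : Int) (s : PySem.Set Int) (m : Int)
    (hm : m ∈ s) : m ∈ (PySem.List.enumerate l n).foldl pvDropStep s := by
  induction l generalizing n s with
  | nil => simpa [PySem.List.enumerate]
  | cons a l ih =>
    simp only [PySem.List.enumerate, List.foldl_cons]
    apply ih
    unfold pvDropStep
    split_ifs <;> simp [PySem.Set.mem_add, hm]

-- main invariant: second-pass filtering of the suffix equals A's loop
lemma pvMain (l : List String) (n : Int) (s : PySem.Set Int)
    (hs : ∀ m ∈ s, m ≤ n) :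
    (((PySem.List.enumerate l n).filter
        (fun p => !(((PySem.List.enumerate l n).foldl pvDropStep s).contains p.1))).map
      Prod.snd) = pvLoopA l (s.contains n) := by
  induction l generalizing n s with
  | nil => simp [PySem.List.enumerate, pvLoopA]
  | cons a l ih =>
    simp only [PySem.List.enumerate, List.foldl_cons, List.filter_cons]
    by_cases hsk : n ∈ s
    · -- skip_next is set: this element was consumed as the value of a bare flag
      have hstep : pvDropStep s (n, a) = s := by simp [pvDropStep, hsk]
      rw [hstep]
      have hmem : ((PySem.List.enumerate l (n + 1)).foldl pvDropStep s).contains n = true :=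
        (PySem.Set.contains_iff _ _).2 (pvDrop_mono l (n + 1) s n hsk)
      have hc1 : s.contains (n + 1) = false :=
        pvContains_false.2 (fun h => by have := hs _ h; omega)
      have h' : ∀ m ∈ s, m ≤ n + 1 := fun m hm => by have := hs _ hm; omega
      rw [(PySem.Set.contains_iff s n).2 hsk]
      simp only [hmem, Bool.not_true, Bool.false_eq_true, reduceIte, pvLoopA]
      rw [ih (n + 1) s h', hc1]
    · have hskb : s.contains n = false := pvContains_false.2 hsk
      rw [hskb]
      by_cases h1 : PySem.Chars.isIn ['='] a.toList
      · by_cases h2 : pvKeyOf a ∈ pvCONFIG_FILE_KEYS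
        · -- --key=value form with a config key: drop this index
          have hstep : pvDropStep s (n, a) = s.add n := by
            simp [pvDropStep, hsk, h1, h2]
          rw [hstep]
          have hmem : ((PySem.List.enumerate l (n + 1)).foldl pvDropStep (s.add n)).contains n
              = true :=
            (PySem.Set.contains_iff _ _).2
              (pvDrop_mono l (n + 1) (s.add n) n ((PySem.Set.mem_add s n n).2 (Or.inr rfl)))
          have h' : ∀ m ∈ s.add n, m ≤ n + 1 := fun m hm => by
            rcases (PySem.Set.mem_add s n m).1 hm with h | h
            · have := hs _ h; omega
            · omega
          have hc1 : (s.add n).contains (n + 1) = false :=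
            pvContains_false.2 (fun h => by
              rcases (PySem.Set.mem_add s n (n + 1)).1 h with h | h
              · have := hs _ h; omega
              · omega)
          simp only [hmem, Bool.not_true, Bool.false_eq_true, reduceIte]
          rw [ih (n + 1) (s.add n) h', hc1]
          simp [pvLoopA, h1, h2]
        · -- key=value with a non-config key: kept
          have hstep : pvDropStep s (n, a) = s := by simp [pvDropStep, hsk, h1, h2]
          rw [hstep]
          have hnd : ((PySem.List.enumerate l (n + 1)).foldl pvDropStep s).contains n = false :=
            pvContains_false.2 (fun h => by
              rcases pvDrop_lb l (n + 1) s n h with h | h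
              · exact hsk h
              · omega)
          have hc1 : s.contains (n + 1) = false :=
            pvContains_false.2 (fun h => by have := hs _ h; omega)
          have h' : ∀ m ∈ s, m ≤ n + 1 := fun m hm => by have := hs _ hm; omega
          simp only [hnd, Bool.not_false, reduceIte, List.map_cons]
          rw [ih (n + 1) s h', hc1]
          simp [pvLoopA, h1, h2]
      · by_cases h3 : a ∈ pvCONFIG_FILE_KEYS
        · -- bare config flag: drop it and the following index
          have hstep : pvDropStep s (n, a) = (s.add n).add (n + 1) := by
            simp [pvDropStep, hsk, h1, h3]
          rw [hstep]
          have hmem : ((PySem.List.enumerate l (n + 1)).foldl pvDropStep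
              ((s.add n).add (n + 1))).contains n = true :=
            (PySem.Set.contains_iff _ _).2
              (pvDrop_mono l (n + 1) _ n
                (((s.add n).mem_add (n + 1) n).2 (Or.inl ((s.mem_add n n).2 (Or.inr rfl)))))
          have h' : ∀ m ∈ (s.add n).add (n + 1), m ≤ n + 1 := fun m hm => by
            rcases ((s.add n).mem_add (n + 1) m).1 hm with h | h
            · rcases (s.mem_add n m).1 h with h | h
              · have := hs _ h; omega
              · omega
            · omega
          have hc1 : ((s.add n).add (n + 1)).contains (n + 1) = true :=
            (PySem.Set.contains_iff _ _).2 (((s.add n).mem_add (n + 1) (n + 1)).2 (Or.inr rfl))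
          simp only [hmem, Bool.not_true, Bool.false_eq_true, reduceIte]
          rw [ih (n + 1) _ h', hc1]
          simp [pvLoopA, h1, h3]
        · -- ordinary argument: kept
          have hstep : pvDropStep s (n, a) = s := by simp [pvDropStep, hsk, h1, h3]
          rw [hstep]
          have hnd : ((PySem.List.enumerate l (n + 1)).foldl pvDropStep s).contains n = false :=
            pvContains_false.2 (fun h => by
              rcases pvDrop_lb l (n + 1) s n h with h | h
              · exact hsk h
              · omega)
          have hc1 : s.contains (n + 1) = false :=
            pvContains_false.2 (fun h => by have := hs _ h; omega)
          have h' : ∀ m ∈ s, m ≤ n + 1 := fun m hm => by have := hs _ hm; omega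
          simp only [hnd, Bool.not_false, reduceIte, List.map_cons]
          rw [ih (n + 1) s h', hc1]
          simp [pvLoopA, h1, h3]

-- ===== VERDICT (by name: the statement is the Claim_ definition above) =====
theorem filter_config_file_args_spec : Claim_equal_filter_config_file_args := by
  intro args _
  unfold Spec_filter_config_file_args filter_config_file_args
  rw [pvFoldA args false []]
  have h := pvMain args 0 PySem.Set.empty (by intro m hm; simp [PySem.Set.empty] at hm)
  have hc : (PySem.Set.empty : PySem.Set Int).contains 0 = false := rfl
  rw [hc] at h
  simp only [filter_config_file_args_alt, List.nil_append]
  exact h.symm
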